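-- pv_equiv track=rewrite | github.com/Revalino-f/graph | reval_graph.py | build_message_grid
-- ===== SOURCE A (Python) =====
-- letters = {
--     "R": [
--         "11110",
--         "10001",
--         "10001",
--         "11110",
--         "10100",
--         "10010",
--         "10001"
--     ],
--     "E": [
--         "11111",
--         "10000",
--         "10000",
--         "11110",
--         "10000",
--         "10000",
--         "11111"
--     ],
--     "V": [
--         "10001",
--         "10001",
--         "10001",
--         "10001",
--         "10001",
--         "01010",
--         "00100"
--     ],
--     "A": [
--         "01110",
--         "10001",
--         "10001",
--         "11111",
--         "10001",
--         "10001",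
--         "10001"
--     ],
--     "L": [
--         "10000",
--         "10000",
--         "10000",
--         "10000",
--         "10000",
--         "10000",
--         "11111"
--     ]
-- }
--
-- def build_message_grid(message):
--     grid = []
--     for row in range(7):
--         line = ''
--         for char in message.upper():
--             if char in letters:
--                 line += letters[char][row] + '0'
--         grid.append(line)
--     return grid
-- ===== SOURCE B (Python) =====
-- letters = {
--     "R": ["11110", "10001", "10001", "11110", "10100", "10010", "10001"],
--     "E": ["11111", "10000", "10000", "11110", "10000", "10000", "11111"],
--     "V": ["10001", "10001", "10001", "10001", "10001", "01010", "00100"],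
--     "A": ["01110", "10001", "10001", "11111", "10001", "10001", "10001"],
--     "L": ["10000", "10000", "10000", "10000", "10000", "10000", "11111"],
-- }
--
--
-- def build_message_grid(message):
--     # single pass over the message: maintain seven chunk lists at once, join at the end
--     rows = [[], [], [], [], [], [], []]
--     for char in message.upper():
--         glyph = letters.get(char)
--         if glyph is not None:
--             for row, g_row in zip(rows, glyph):
--                 row.append(g_row + '0')
--     return [''.join(row) for row in rows]
-- ===== Notes on version B (the rewrite author's own statement) =====
-- stated objective: alternative
-- what changed: B scans message.upper() once, maintaining all seven row accumulators simultaneously (zip of lines with the glyph), instead of A's seven independent scans of the message, one per row.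
import Mathlib
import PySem

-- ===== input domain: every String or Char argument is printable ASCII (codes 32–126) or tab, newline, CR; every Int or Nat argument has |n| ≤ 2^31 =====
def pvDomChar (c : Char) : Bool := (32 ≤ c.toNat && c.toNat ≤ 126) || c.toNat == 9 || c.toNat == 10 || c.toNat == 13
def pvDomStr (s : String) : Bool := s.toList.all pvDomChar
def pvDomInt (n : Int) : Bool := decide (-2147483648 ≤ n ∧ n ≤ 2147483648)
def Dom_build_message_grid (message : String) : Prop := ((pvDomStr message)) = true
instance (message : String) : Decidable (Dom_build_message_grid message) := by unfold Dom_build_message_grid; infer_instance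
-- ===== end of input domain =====

-- B maintains all seven row accumulators in one pass over the message instead of A's seven passes (alternative decomposition, same cost).


-- ===== PORT A =====
-- the module-level 'letters' dict (keys are 1-char strings, ported as Char)
def pvLetters : PySem.Dict Char (List String) := PySem.Dict.ofList
  [ ('R', ["11110", "10001", "10001", "11110", "10100", "10010", "10001"]),
    ('E', ["11111", "10000", "10000", "11110", "10000", "10000", "11111"]),
    ('V', ["10001", "10001", "10001", "10001", "10001", "01010", "00100"]),
    ('A', ["01110", "10001", "10001", "11111", "10001", "10001", "10001"]),
    ('L', ["10000", "10000", "10000", "10000", "10000", "10000", "11111"]) ]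

-- body of A's inner loop: "if char in letters: line += letters[char][row] + '0'"
-- (every glyph has 7 rows and row < 7, so letters[char][row] never raises; getD is exact here)
def pvRowStep (row : Nat) (line : String) (c : Char) : String :=
  match pvLetters.get? c with
  | some g => line ++ g.getD row "" ++ "0"
  | none => line

def build_message_grid (message : String) : List String :=
  (List.range 7).foldl
    (fun grid row => grid ++ [(PySem.Str.upper message).toList.foldl (pvRowStep row) ""])
    []

-- ===== PORT B =====
-- body of B's loop: glyph = letters.get(char); if present, append a chunk to every row's chunk list
def pvAltStep (rows : List (List String)) (c : Char) : List (List String) :=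
  match pvLetters.get? c with
  | some g => List.zipWith (fun row gr => row ++ [gr ++ "0"]) rows g
  | none => rows

def build_message_grid_alt (message : String) : List String :=
  ((PySem.Str.upper message).toList.foldl pvAltStep [[], [], [], [], [], [], []]).map
    (fun row => PySem.Str.join "" row)

-- ===== PRECONDITION & SPEC =====
def Spec_build_message_grid (message : String) (out : List String) : Prop := out = build_message_grid_alt message
instance (message : String) (out : List String) : Decidable (Spec_build_message_grid message out) := by unfold Spec_build_message_grid; infer_instance

-- ===== CLAIM (what is proved, stated in full; the proofs are below) =====
def Claim_equal_build_message_grid : Prop := ∀ (message : String), Dom_build_message_grid message → Spec_build_message_grid message (build_message_grid message)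

-- ===== LEMMAS AND PROOFS =====

-- every glyph in the table has exactly 7 rows
theorem pvGlyph_length (c : Char) (g : List String) (h : pvLetters.get? c = some g) :
    g.length = 7 := by
  have hm : (c, g) ∈ pvLetters.items := PySem.Dict.mem_items_of_get?_eq_some pvLetters h
  have e : pvLetters.items =
      [ ('R', ["11110", "10001", "10001", "11110", "10100", "10010", "10001"]),
        ('E', ["11111", "10000", "10000", "11110", "10000", "10000", "11111"]),
        ('V', ["10001", "10001", "10001", "10001", "10001", "01010", "00100"]),
        ('A', ["01110", "10001", "10001", "11111", "10001", "10001", "10001"]),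
        ('L', ["10000", "10000", "10000", "10000", "10000", "10000", "11111"]) ] := by rfl
  rw [e] at hm
  simp only [List.mem_cons, List.not_mem_nil, or_false, Prod.mk.injEq] at hm
  rcases hm with ⟨-, rfl⟩ | ⟨-, rfl⟩ | ⟨-, rfl⟩ | ⟨-, rfl⟩ | ⟨-, rfl⟩ <;> rfl

-- joining with the empty separator is concatenation
theorem pvChars_join_nil (l : List (List Char)) : PySem.Chars.join [] l = l.flatten := by
  induction l with
  | nil => simp [PySem.Chars.join_nil]
  | cons c t ih =>
    cases t with
    | nil => simp [PySem.Chars.join_singleton]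
    | cons d t' => rw [PySem.Chars.join_cons_cons]; simp_all

-- appending one chunk to a row's chunk list appends it to the joined row
theorem pvJoin_snoc (l : List String) (x : String) :
    PySem.Str.join "" (l ++ [x]) = PySem.Str.join "" l ++ x := by
  apply String.ext
  simp [pvChars_join_nil]

-- B's fold over any character list, rows joined, equals the list of A's seven row folds
theorem pvFold_rowwise (cs : List Char) :
    ∀ l0 l1 l2 l3 l4 l5 l6 : List String,
      (cs.foldl pvAltStep [l0, l1, l2, l3, l4, l5, l6]).map (fun row => PySem.Str.join "" row) =
        [cs.foldl (pvRowStep 0) (PySem.Str.join "" l0), cs.foldl (pvRowStep 1) (PySem.Str.join "" l1),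
         cs.foldl (pvRowStep 2) (PySem.Str.join "" l2), cs.foldl (pvRowStep 3) (PySem.Str.join "" l3),
         cs.foldl (pvRowStep 4) (PySem.Str.join "" l4), cs.foldl (pvRowStep 5) (PySem.Str.join "" l5),
         cs.foldl (pvRowStep 6) (PySem.Str.join "" l6)] := by
  induction cs with
  | nil => intro l0 l1 l2 l3 l4 l5 l6; simp
  | cons c cs ih =>
    intro l0 l1 l2 l3 l4 l5 l6
    simp only [List.foldl_cons]
    rcases h : pvLetters.get? c with _ | g
    · rw [show pvAltStep [l0, l1, l2, l3, l4, l5, l6] c = [l0, l1, l2, l3, l4, l5, l6] by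
        simp [pvAltStep, h]]
      have hr : ∀ r s, pvRowStep r s c = s := fun r s => by simp [pvRowStep, h]
      simp only [hr]
      exact ih _ _ _ _ _ _ _
    · have hg := pvGlyph_length c g h
      rcases g with _ | ⟨g0, _ | ⟨g1, _ | ⟨g2, _ | ⟨g3, _ | ⟨g4, _ | ⟨g5, _ | ⟨g6, _ | ⟨g7, t⟩⟩⟩⟩⟩⟩⟩⟩ <;>
        simp_all only [List.length_cons, List.length_nil] <;> try omega
      rw [show pvAltStep [l0, l1, l2, l3, l4, l5, l6] c =
          [l0 ++ [g0 ++ "0"], l1 ++ [g1 ++ "0"], l2 ++ [g2 ++ "0"], l3 ++ [g3 ++ "0"],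
           l4 ++ [g4 ++ "0"], l5 ++ [g5 ++ "0"], l6 ++ [g6 ++ "0"]] by
        simp [pvAltStep, h, List.zipWith]]
      rw [ih]
      have hr : ∀ (r : Nat) (s : String),
          pvRowStep r s c = s ++ [g0, g1, g2, g3, g4, g5, g6].getD r "" ++ "0" :=
        fun r s => by simp [pvRowStep, h]
      simp only [pvJoin_snoc, hr, List.getD_cons_zero, List.getD_cons_succ]
      simp [String.append_assoc]

-- ===== VERDICT (by name: the statement is the Claim_ definition above) =====
theorem build_message_grid_spec : Claim_equal_build_message_grid := by
  intro message _
  show build_message_grid message = build_message_grid_alt message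
  unfold build_message_grid build_message_grid_alt
  rw [show List.range 7 = [0, 1, 2, 3, 4, 5, 6] from rfl]
  rw [pvFold_rowwise]
  rfl
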